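-- pv_equiv track=rewrite | github.com/hrtk2299/attention-based-nmt | utility.py | create_id_dataset
-- ===== SOURCE A (Python) =====
-- def create_id_dataset(text_iterator, end_symbol="\n"):
--     id_dataset = []
--     word2index = {"<bos>": 0, "<eos>": 1}
--     for line in text_iterator:
--         line = line.replace('\n', ' <eos>')
--         for word in line.split():
--             if word not in word2index:
--                 ind = len(word2index)
--                 word2index[word] = ind
--             id_dataset.append(word2index[word])
--
--     return id_dataset, word2index
-- ===== SOURCE B (Python) =====
-- def create_id_dataset(text_iterator, end_symbol="\n"):
--     # Pass 0: consume the iterator once into a flat token list.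
--     tokens = []
--     for line in text_iterator:
--         tokens.extend(line.replace('\n', ' <eos>').split())
--     # Pass 1: build the vocabulary (first-appearance order).
--     word2index = {"<bos>": 0, "<eos>": 1}
--     for w in tokens:
--         if w not in word2index:
--             word2index[w] = len(word2index)
--     # Pass 2: encode.
--     id_dataset = [word2index[w] for w in tokens]
--     return id_dataset, word2index
-- ===== Notes on version B (the rewrite author's own statement) =====
-- stated objective: alternative
-- what changed: A interleaves vocabulary building and id emission in one nested loop; B first flattens all tokens into one list, then builds word2index in a separate pass, then encodes with a comprehension mapping tokens through the finished table.
import Mathlib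
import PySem

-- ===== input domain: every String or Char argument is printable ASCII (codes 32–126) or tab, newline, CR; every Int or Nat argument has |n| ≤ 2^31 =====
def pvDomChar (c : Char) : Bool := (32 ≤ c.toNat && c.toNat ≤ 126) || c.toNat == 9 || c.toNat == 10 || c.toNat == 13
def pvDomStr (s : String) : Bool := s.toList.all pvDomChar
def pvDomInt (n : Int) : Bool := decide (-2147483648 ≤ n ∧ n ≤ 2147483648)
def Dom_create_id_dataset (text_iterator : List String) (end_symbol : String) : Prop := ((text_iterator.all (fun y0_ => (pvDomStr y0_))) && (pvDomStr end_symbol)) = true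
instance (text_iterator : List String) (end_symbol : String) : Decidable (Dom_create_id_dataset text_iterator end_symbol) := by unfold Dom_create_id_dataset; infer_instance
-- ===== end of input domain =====

-- B restructures A's single interleaved loop into three passes: flatten tokens, build the vocabulary, then encode (objective: alternative decomposition; same cost).

-- ===== PORT A =====
-- one word of A's inner loop: maybe-insert, then append word2index[word]
def pvAWord (st : List Int × PySem.Dict String Int) (w : String) :
    List Int × PySem.Dict String Int :=
  let d := if st.2.contains w then st.2 else st.2.insert w (st.2.size : Int)
  (st.1 ++ [d.getD w 0], d)

def create_id_dataset (text_iterator : List String) (end_symbol : String) :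
    List Int × (List (String × Int)) :=
  let init : List Int × PySem.Dict String Int :=
    ([], (PySem.Dict.empty.insert "<bos>" 0).insert "<eos>" 1)
  let st := text_iterator.foldl
    (fun st line =>
      (PySem.Str.split₀ (PySem.Str.replace line "\n" " <eos>")).foldl pvAWord st)
    init
  (st.1, st.2.items)

-- ===== PORT B =====
def pvBTokens (line : String) : List String :=
  PySem.Str.split₀ (PySem.Str.replace line "\n" " <eos>")

def pvBBuild (d : PySem.Dict String Int) (w : String) : PySem.Dict String Int :=
  if d.contains w then d else d.insert w (d.size : Int)

def create_id_dataset_alt (text_iterator : List String) (end_symbol : String) :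
    List Int × (List (String × Int)) :=
  let tokens := text_iterator.foldl (fun acc line => acc ++ pvBTokens line) []
  let word2index := tokens.foldl pvBBuild
    ((PySem.Dict.empty.insert "<bos>" 0).insert "<eos>" 1)
  (tokens.map (fun w => word2index.getD w 0), word2index.items)

-- ===== PRECONDITION & SPEC =====
def Spec_create_id_dataset (text_iterator : List String) (end_symbol : String) (out : List Int × (List (String × Int))) : Prop := out = create_id_dataset_alt text_iterator end_symbol
instance (text_iterator : List String) (end_symbol : String) (out : List Int × (List (String × Int))) : Decidable (Spec_create_id_dataset text_iterator end_symbol out) := by unfold Spec_create_id_dataset; infer_instance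

-- ===== CLAIM (what is proved, stated in full; the proofs are below) =====
def Claim_equal_create_id_dataset : Prop := ∀ (text_iterator : List String) (end_symbol : String), Dom_create_id_dataset text_iterator end_symbol → Spec_create_id_dataset text_iterator end_symbol (create_id_dataset text_iterator end_symbol)

-- ===== LEMMAS AND PROOFS =====

-- the build fold never overwrites an existing binding
theorem pvBuild_stable (ts : List String) (d : PySem.Dict String Int) (k : String) (v : Int)
    (h : d.get? k = some v) : (ts.foldl pvBBuild d).get? k = some v := by
  induction ts generalizing d with
  | nil => exact h
  | cons w ts ih =>
      simp only [List.foldl_cons]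
      apply ih
      unfold pvBBuild
      split
      · exact h
      · rename_i hc
        rcases eq_or_ne k w with rfl | hne
        · rw [PySem.Dict.contains_eq_isSome_get?, h] at hc; simp at hc
        · rw [PySem.Dict.get?_insert_of_ne _ _ hne]; exact h

-- A's interleaved loop = build pass then encode pass
theorem pvMain (ts : List String) (ids : List Int) (d : PySem.Dict String Int) :
    ts.foldl pvAWord (ids, d) =
      (ids ++ ts.map (fun w => (ts.foldl pvBBuild d).getD w 0), ts.foldl pvBBuild d) := by
  induction ts generalizing ids d with
  | nil => simp
  | cons w ts ih =>
      simp only [List.foldl_cons, List.map_cons]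
      have hkey : (pvBBuild d w).get? w = some ((pvBBuild d w).getD w 0) := by
        unfold pvBBuild
        split
        · rename_i hc
          rw [PySem.Dict.contains_eq_isSome_get?] at hc
          cases hg : d.get? w with
          | none => rw [hg] at hc; simp at hc
          | some v => rw [PySem.Dict.getD_of_get?_eq_some _ 0 hg]
        · rw [PySem.Dict.get?_insert_self, PySem.Dict.getD_insert_self]
      have hfin : (ts.foldl pvBBuild (pvBBuild d w)).getD w 0 = (pvBBuild d w).getD w 0 :=
        PySem.Dict.getD_of_get?_eq_some _ 0 (pvBuild_stable ts _ _ _ hkey)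
      have hA : pvAWord (ids, d) w = (ids ++ [(pvBBuild d w).getD w 0], pvBBuild d w) := by
        unfold pvAWord pvBBuild
        split <;> simp_all
      rw [hA, ih]
      simp [hfin]

-- B's token-accumulating fold peels its accumulator off the front
theorem pvAccum (ls : List String) (acc : List String) :
    ls.foldl (fun acc line => acc ++ pvBTokens line) acc =
      acc ++ ls.foldl (fun acc line => acc ++ pvBTokens line) [] := by
  induction ls generalizing acc with
  | nil => simp
  | cons x xs ih =>
      simp only [List.foldl_cons, List.nil_append]
      rw [ih (acc ++ pvBTokens x), ih (pvBTokens x), List.append_assoc]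

-- A's per-line double loop is the fold of pvAWord over the flattened token list
theorem pvFlatten (lines : List String) (st : List Int × PySem.Dict String Int) :
    lines.foldl (fun st line => (pvBTokens line).foldl pvAWord st) st =
      (lines.foldl (fun acc line => acc ++ pvBTokens line) []).foldl pvAWord st := by
  induction lines generalizing st with
  | nil => rfl
  | cons l ls ih =>
      simp only [List.foldl_cons, List.nil_append]
      rw [ih, pvAccum ls (pvBTokens l), List.foldl_append]

-- ===== VERDICT (by name: the statement is the Claim_ definition above) =====
theorem create_id_dataset_spec : Claim_equal_create_id_dataset := by
  intro ti es _
  show _ = _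
  unfold create_id_dataset create_id_dataset_alt
  simp only []
  rw [show (fun st line => (PySem.Str.split₀ (PySem.Str.replace line "\n" " <eos>")).foldl pvAWord st)
        = (fun st line => (pvBTokens line).foldl pvAWord st) from rfl]
  rw [pvFlatten, pvMain]
  rfl
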